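-- pv_equiv track=rewrite | github.com/Uteeaami/karaoke | executables/whisper/karaoke_algo.py | underliner
-- ===== SOURCE A (Python) =====
-- def underliner(start, end, string):
--     s = list(string)
--     s2 = []
--     for i in range(len(s)):
--         if (i == start):
--             s2.append('<u>')
--         if (i == end):
--             s2.append('</u>')
--         s2.append(s[i])
--     return("".join(s2))
-- ===== SOURCE B (Python) =====
-- def underliner(start, end, string):
--     n = len(string)
--     marks = [(i, t) for i, t in ((start, '<u>'), (end, '</u>')) if 0 <= i < n]
--     marks.sort(key=lambda m: m[0])
--     parts = []
--     prev = 0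
--     for i, t in marks:
--         parts.append(string[prev:i])
--         parts.append(t)
--         prev = i
--     parts.append(string[prev:])
--     return ''.join(parts)
-- ===== Notes on version B (the rewrite author's own statement) =====
-- stated objective: idiomatic
-- what changed: Replaces A's per-character scan (which tests every index against start and end) by collecting the two tag positions, filtering those in range, sorting them stably by index, and slicing the string at these boundaries.
import Mathlib
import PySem

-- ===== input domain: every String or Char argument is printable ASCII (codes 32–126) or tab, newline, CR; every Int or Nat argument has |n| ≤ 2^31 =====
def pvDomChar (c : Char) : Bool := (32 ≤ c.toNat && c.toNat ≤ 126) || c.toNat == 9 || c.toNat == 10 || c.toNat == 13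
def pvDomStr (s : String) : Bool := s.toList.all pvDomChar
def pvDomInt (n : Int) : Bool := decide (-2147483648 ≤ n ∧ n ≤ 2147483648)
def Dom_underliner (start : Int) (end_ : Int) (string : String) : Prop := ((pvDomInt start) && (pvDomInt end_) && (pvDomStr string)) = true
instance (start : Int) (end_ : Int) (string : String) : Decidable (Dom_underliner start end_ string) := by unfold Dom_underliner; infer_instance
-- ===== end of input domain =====

-- B replaces A's per-character scan by filtering/sorting the two tag positions and slicing the string at those boundaries (idiomatic; measured faster in a timing run, constant factor).

-- ===== PORT A =====
def underliner (start : Int) (end_ : Int) (string : String) : String :=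
  let s : List Char := string.toList
  let s2 : List String :=
    (PySem.List.pyRange 0 (s.length : Int) 1).foldl
      (fun s2 i =>
        let s2 := if i = start then s2 ++ ["<u>"] else s2
        let s2 := if i = end_ then s2 ++ ["</u>"] else s2
        -- s[i]: i ranges over range(len(s)), always in bounds, so the default is never used
        s2 ++ [String.ofList [PySem.List.pyGetD s i ' ']]) []
  PySem.Str.join "" s2

-- ===== PORT B =====
def underliner_alt (start : Int) (end_ : Int) (string : String) : String :=
  let n : Int := PySem.Str.len string
  let marks : List (Int × String) :=
    ([(start, "<u>"), (end_, "</u>")]).filter (fun m => decide (0 ≤ m.1 ∧ m.1 < n))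
  let marks := PySem.List.sorted marks (fun m => m.1)
  let r : List String × Int :=
    marks.foldl
      (fun (acc : List String × Int) m =>
        (acc.1 ++ [PySem.Str.slice string (some acc.2) (some m.1), m.2], m.1))
      ([], 0)
  PySem.Str.join "" (r.1 ++ [PySem.Str.slice string (some r.2) none])

-- ===== PRECONDITION & SPEC =====
def Spec_underliner (start : Int) (end_ : Int) (string : String) (out : String) : Prop := out = underliner_alt start end_ string
instance (start : Int) (end_ : Int) (string : String) (out : String) : Decidable (Spec_underliner start end_ string out) := by unfold Spec_underliner; infer_instance

-- ===== CLAIM (what is proved, stated in full; the proofs are below) =====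
def Claim_equal_underliner : Prop := ∀ (start : Int) (end_ : Int) (string : String), Dom_underliner start end_ string → Spec_underliner start end_ string (underliner start end_ string)

-- ===== LEMMAS AND PROOFS =====

-- the two tags, as character lists
def tagU : List Char := ['<', 'u', '>']
def tagV : List Char := ['<', '/', 'u', '>']

-- recursive model of A's scan: walk the characters, inserting tagU where the
-- remaining distance to `start` is 0 and tagV where the distance to `end_` is 0
def M (s e : Int) : List Char → List Char
  | [] => []
  | c :: cs => (if s = 0 then tagU else []) ++ (if e = 0 then tagV else []) ++ c :: M (s - 1) (e - 1) cs

lemma intercalate_nil_flatten (L : List (List Char)) : [].intercalate L = L.flatten := by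
  induction L with
  | nil => rfl
  | cons x xs ih => cases xs <;> simp_all [List.intercalate]

lemma join_toList (L : List String) : (PySem.Str.join "" L).toList = (L.map String.toList).flatten := by
  simp only [PySem.Str.join, PySem.Chars.join, String.toList_empty, String.toList_ofList]
  exact intercalate_nil_flatten _

-- A's flatMap over indices equals the recursive model M
lemma flatten_flatMap' {α : Type} {β : Type} (l : List α) (g : α → List (List β)) :
    (l.flatMap g).flatten = l.flatMap (fun a => (g a).flatten) := by
  induction l with
  | nil => rfl
  | cons x xs ih => simp [List.flatMap_cons, ih]

lemma flat_eq (s e : Int) (cs : List Char) :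
    (List.range cs.length).flatMap
      (fun (k : Nat) => (if (k : Int) = s then tagU else []) ++ (if (k : Int) = e then tagV else []) ++ [cs.getD k ' '])
    = M s e cs := by
  induction cs generalizing s e with
  | nil => rfl
  | cons c cs ih =>
    have hf : (fun k : Nat =>
        (if ((k + 1 : Nat) : Int) = s then tagU else []) ++ (if ((k + 1 : Nat) : Int) = e then tagV else [])
          ++ [(c :: cs).getD (k + 1) ' '])
        = (fun k : Nat =>
        (if (k : Int) = s - 1 then tagU else []) ++ (if (k : Int) = e - 1 then tagV else []) ++ [cs.getD k ' ']) := by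
      funext k
      have h1 : ((k : Int) + 1 = s) = ((k : Int) = s - 1) := by apply propext; omega
      have h2 : ((k : Int) + 1 = e) = ((k : Int) = e - 1) := by apply propext; omega
      push_cast
      simp only [h1, h2]
      simp
    simp only [List.length_cons, List.range_succ_eq_map, List.flatMap_cons, List.flatMap_map, M]
    simp only [Nat.succ_eq_add_one, hf, ih]
    simp [eq_comm]

-- A's port computes M
set_option maxHeartbeats 1000000 in
lemma A_eq (s e : Int) (str : String) : (underliner s e str).toList = M s e str.toList := by
  unfold underliner
  have hbody : (fun (s2 : List String) (i : Int) =>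
      let s2 := if i = s then s2 ++ ["<u>"] else s2
      let s2 := if i = e then s2 ++ ["</u>"] else s2
      s2 ++ [String.ofList [PySem.List.pyGetD str.toList i ' ']])
      = (fun (s2 : List String) (i : Int) => s2 ++
        ((if i = s then ["<u>"] else []) ++ (if i = e then ["</u>"] else [])
          ++ [String.ofList [PySem.List.pyGetD str.toList i ' ']])) := by
    funext s2 i; split_ifs <;> simp
  simp only [hbody, PySem.List.foldl_append_eq_flatMap, List.nil_append]
  rw [join_toList, PySem.List.pyRange_one, List.map_flatMap, flatten_flatMap', List.flatMap_map]
  rw [← flat_eq s e str.toList]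
  have hlen : (((str.toList.length : Int)) - 0).toNat = str.toList.length := by omega
  rw [hlen]
  congr 1
  funext k
  simp only [zero_add, PySem.List.pyGetD_natCast]
  split_ifs <;> simp [tagU, tagV]

-- case lemmas for M
lemma M_out (s e : Int) (cs : List Char)
    (hs : s < 0 ∨ (cs.length : Int) ≤ s) (he : e < 0 ∨ (cs.length : Int) ≤ e) :
    M s e cs = cs := by
  induction cs generalizing s e with
  | nil => rfl
  | cons c cs ih =>
    simp only [List.length_cons] at hs he
    have h1 : s ≠ 0 := by omega
    have h2 : e ≠ 0 := by omega
    simp only [M, if_neg h1, if_neg h2, List.nil_append]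
    rw [ih _ _ (by omega) (by omega)]

lemma M_sonly (s e : Int) (cs : List Char)
    (hs0 : 0 ≤ s) (hs1 : s < (cs.length : Int)) (he : e < 0 ∨ (cs.length : Int) ≤ e) :
    M s e cs = cs.take s.toNat ++ tagU ++ cs.drop s.toNat := by
  induction cs generalizing s e with
  | nil => simp at hs1; omega
  | cons c cs ih =>
    simp only [List.length_cons] at hs1 he
    by_cases h : s = 0
    · subst h
      have h2 : e ≠ 0 := by omega
      simp only [M, if_pos, if_neg h2, List.nil_append]
      rw [M_out _ _ _ (by omega) (by omega)]
      simp
    · have h2 : e ≠ 0 := by omega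
      simp only [M, if_neg h, if_neg h2, List.nil_append]
      rw [ih _ _ (by omega) (by omega) (by omega)]
      have ht : s.toNat = (s - 1).toNat + 1 := by omega
      rw [ht, List.take_succ_cons, List.drop_succ_cons]
      simp

lemma M_eonly (s e : Int) (cs : List Char)
    (he0 : 0 ≤ e) (he1 : e < (cs.length : Int)) (hs : s < 0 ∨ (cs.length : Int) ≤ s) :
    M s e cs = cs.take e.toNat ++ tagV ++ cs.drop e.toNat := by
  induction cs generalizing s e with
  | nil => simp at he1; omega
  | cons c cs ih =>
    simp only [List.length_cons] at he1 hs
    by_cases h : e = 0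
    · subst h
      have h2 : s ≠ 0 := by omega
      simp only [M, if_pos, if_neg h2, List.nil_append]
      rw [M_out _ _ _ (by omega) (by omega)]
      simp
    · have h2 : s ≠ 0 := by omega
      simp only [M, if_neg h, if_neg h2, List.nil_append]
      rw [ih _ _ (by omega) (by omega) (by omega)]
      have ht : e.toNat = (e - 1).toNat + 1 := by omega
      rw [ht, List.take_succ_cons, List.drop_succ_cons]
      simp

lemma M_le (s e : Int) (cs : List Char)
    (hs0 : 0 ≤ s) (hse : s ≤ e) (he : e < (cs.length : Int)) :
    M s e cs = cs.take s.toNat ++ tagU ++ (cs.drop s.toNat).take (e.toNat - s.toNat)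
      ++ tagV ++ cs.drop e.toNat := by
  induction cs generalizing s e with
  | nil => simp at he; omega
  | cons c cs ih =>
    simp only [List.length_cons] at he
    by_cases h : s = 0
    · subst h
      by_cases h2 : e = 0
      · subst h2
        simp only [M, if_pos rfl, List.nil_append]
        rw [M_out _ _ _ (by omega) (by omega)]
        simp
      · simp only [M, if_pos rfl, if_neg h2, List.nil_append]
        rw [M_eonly _ _ _ (by omega) (by omega) (by omega)]
        have ht : e.toNat = (e - 1).toNat + 1 := by omega
        rw [ht]
        simp [List.take_succ_cons, List.drop_succ_cons]
    · have h2 : e ≠ 0 := by omega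
      simp only [M, if_neg h, if_neg h2, List.nil_append]
      rw [ih _ _ (by omega) (by omega) (by omega)]
      have ht : s.toNat = (s - 1).toNat + 1 := by omega
      have ht2 : e.toNat = (e - 1).toNat + 1 := by omega
      have ht3 : e.toNat - s.toNat = (e - 1).toNat - (s - 1).toNat := by omega
      rw [ht, ht2, List.take_succ_cons, List.drop_succ_cons, List.drop_succ_cons]
      simp [Nat.add_sub_add_right]

lemma M_gt (s e : Int) (cs : List Char)
    (he0 : 0 ≤ e) (hes : e < s) (hs : s < (cs.length : Int)) :
    M s e cs = cs.take e.toNat ++ tagV ++ (cs.drop e.toNat).take (s.toNat - e.toNat)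
      ++ tagU ++ cs.drop s.toNat := by
  induction cs generalizing s e with
  | nil => simp at hs; omega
  | cons c cs ih =>
    simp only [List.length_cons] at hs
    by_cases h : e = 0
    · subst h
      have h2 : s ≠ 0 := by omega
      simp only [M, if_pos rfl, if_neg h2, List.nil_append]
      rw [M_sonly _ _ _ (by omega) (by omega) (by omega)]
      have ht : s.toNat = (s - 1).toNat + 1 := by omega
      rw [ht]
      simp [List.take_succ_cons, List.drop_succ_cons]
    · have h2 : s ≠ 0 := by omega
      simp only [M, if_neg h, if_neg h2, List.nil_append]
      rw [ih _ _ (by omega) (by omega) (by omega)]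
      have ht : s.toNat = (s - 1).toNat + 1 := by omega
      have ht2 : e.toNat = (e - 1).toNat + 1 := by omega
      have ht3 : s.toNat - e.toNat = (s - 1).toNat - (e - 1).toNat := by omega
      rw [ht, ht2, List.take_succ_cons, List.drop_succ_cons, List.drop_succ_cons]
      simp [Nat.add_sub_add_right]

-- B's port, reduced by cases on which tag positions are in range and their order
lemma B_eq (s e : Int) (str : String) : (underliner_alt s e str).toList = M s e str.toList := by
  unfold underliner_alt
  by_cases hP : 0 ≤ s ∧ s < (str.toList.length : Int) <;> by_cases hQ : 0 ≤ e ∧ e < (str.toList.length : Int)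
  · -- both tags fall inside the string
    by_cases hse : s ≤ e
    · have hfil : ([(s, "<u>"), (e, "</u>")]).filter
          (fun m => decide (0 ≤ m.1 ∧ m.1 < PySem.Str.len str)) = [(s, "<u>"), (e, "</u>")] := by
        simp only [List.filter_cons, List.filter_nil, decide_eq_true_eq, PySem.Str.len_eq]
        rw [if_pos hP, if_pos hQ]
      have hsort : PySem.List.sorted [(s, "<u>"), (e, "</u>")] (fun m : Int × String => m.1)
          = [(s, "<u>"), (e, "</u>")] := by
        apply PySem.List.sorted_eq_self_of_pairwise
        simp [hse]
      simp only [hfil, hsort]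
      simp only [List.foldl_cons, List.foldl_nil, List.nil_append]
      rw [join_toList]
      simp only [List.map_cons, List.map_nil, List.map_append, List.flatten]
      rw [M_le s e str.toList hP.1 hse hQ.2]
      simp [PySem.Str.slice, PySem.List.slice_toNat _ hP.1 hQ.1,
        PySem.List.slice_toNat _ (by omega : (0:Int) ≤ 0) hP.1,
        PySem.List.slice_from _ hQ.1, tagU, tagV]
    · have hes : e < s := by omega
      have hfil : ([(s, "<u>"), (e, "</u>")]).filter
          (fun m => decide (0 ≤ m.1 ∧ m.1 < PySem.Str.len str)) = [(s, "<u>"), (e, "</u>")] := by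
        simp only [List.filter_cons, List.filter_nil, decide_eq_true_eq, PySem.Str.len_eq]
        rw [if_pos hP, if_pos hQ]
      have hsort : PySem.List.sorted [(s, "<u>"), (e, "</u>")] (fun m : Int × String => m.1)
          = [(e, "</u>"), (s, "<u>")] := by
        apply PySem.List.sorted_eq_of_perm_of_pairwise_lt
        · exact List.Perm.swap _ _ _
        · simp [hes]
      simp only [hfil, hsort]
      simp only [List.foldl_cons, List.foldl_nil, List.nil_append]
      rw [join_toList]
      simp only [List.map_cons, List.map_nil, List.map_append, List.flatten]
      rw [M_gt s e str.toList hQ.1 hes hP.2]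
      simp [PySem.Str.slice, PySem.List.slice_toNat _ hQ.1 hP.1,
        PySem.List.slice_toNat _ (by omega : (0:Int) ≤ 0) hQ.1,
        PySem.List.slice_from _ hP.1, tagU, tagV]
  · -- only `start` in range
    have hfil : ([(s, "<u>"), (e, "</u>")]).filter
        (fun m => decide (0 ≤ m.1 ∧ m.1 < PySem.Str.len str)) = [(s, "<u>")] := by
      simp only [List.filter_cons, List.filter_nil, decide_eq_true_eq, PySem.Str.len_eq]
      rw [if_pos hP, if_neg hQ]
    simp only [hfil]
    simp only [PySem.List.sorted, List.foldl_cons, List.foldl_nil, List.nil_append]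
    rw [join_toList]
    simp only [List.map_cons, List.map_nil, List.map_append, List.flatten]
    rw [M_sonly s e str.toList hP.1 hP.2 (by omega)]
    simp [PySem.List.insertBy, PySem.Str.slice, PySem.List.slice_toNat _ (by omega : (0:Int) ≤ 0) hP.1,
      PySem.List.slice_from _ hP.1, tagU]
  · -- only `end` in range
    have hfil : ([(s, "<u>"), (e, "</u>")]).filter
        (fun m => decide (0 ≤ m.1 ∧ m.1 < PySem.Str.len str)) = [(e, "</u>")] := by
      simp only [List.filter_cons, List.filter_nil, decide_eq_true_eq, PySem.Str.len_eq]
      rw [if_neg hP, if_pos hQ]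
    simp only [hfil]
    simp only [PySem.List.sorted, List.foldl_cons, List.foldl_nil, List.nil_append]
    rw [join_toList]
    simp only [List.map_cons, List.map_nil, List.map_append, List.flatten]
    rw [M_eonly s e str.toList hQ.1 hQ.2 (by omega)]
    simp [PySem.List.insertBy, PySem.Str.slice, PySem.List.slice_toNat _ (by omega : (0:Int) ≤ 0) hQ.1,
      PySem.List.slice_from _ hQ.1, tagV]
  · -- neither tag in range
    have hfil : ([(s, "<u>"), (e, "</u>")]).filter
        (fun m => decide (0 ≤ m.1 ∧ m.1 < PySem.Str.len str)) = [] := by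
      simp only [List.filter_cons, List.filter_nil, decide_eq_true_eq, PySem.Str.len_eq]
      rw [if_neg hP, if_neg hQ]
    simp only [hfil]
    simp only [PySem.List.sorted, List.foldl_nil, List.nil_append]
    rw [join_toList]
    simp only [List.map_cons, List.map_nil, List.flatten]
    rw [M_out s e str.toList (by omega) (by omega)]
    simp [PySem.Str.slice, PySem.List.slice_from _ (by omega : (0:Int) ≤ 0)]

-- ===== VERDICT (by name: the statement is the Claim_ definition above) =====
theorem underliner_spec : Claim_equal_underliner := by
  intro s e str _
  unfold Spec_underliner
  apply String.toList_inj.mp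
  rw [A_eq, B_eq]
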